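-- pv_equiv track=rewrite | github.com/allofphysics/Python_Scripts | task_assignment.py | tasksScheduling
-- ===== SOURCE A (Python) =====
-- def tasksScheduling(workingHours, tasks):
--     if max(tasks)>workingHours:
--         return -1
--     a=tasks.count(workingHours)
--     for ix in range(a):
--         tasks.remove(workingHours)
--
--     if tasks==[]:
--         return a
--     if len(tasks)==1:
--         return 1
--     tasks=sorted(tasks)
--     count =0
--     while len(tasks)>1:
--         if tasks[-1]+tasks[0]<workingHours:
--             tasks[-1]+=tasks[0]
--
--             del tasks[0]
--         elif tasks[-1]+tasks[0]==workingHours: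
--             count+=1
--             del tasks[0]
--             del tasks[-1]
--         elif tasks[-1]+tasks[0]>workingHours:
--             del tasks[-1]
--             count +=1
--     return count+a+len(tasks)
-- ===== SOURCE B (Python) =====
-- def tasksScheduling(workingHours, tasks):
--     # Two-pointer sweep over a sorted copy; does not mutate `tasks`.
--     if max(tasks) > workingHours:
--         return -1
--     rest = sorted(t for t in tasks if t != workingHours)
--     count = len(tasks) - len(rest)  # tasks that fill a whole day by themselves
--     lo, hi, acc = 0, len(rest) - 1, 0
--     while lo < hi:
--         s = rest[lo] + rest[hi] + acc
--         if s < workingHours: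
--             acc += rest[lo]
--             lo += 1
--         elif s == workingHours:
--             count += 1
--             lo += 1
--             hi -= 1
--             acc = 0
--         else:
--             count += 1
--             hi -= 1
--             acc = 0
--     return count + (1 if lo == hi else 0)
-- ===== Notes on version B (the rewrite author's own statement) =====
-- stated objective: alternative
-- what changed: Replaces A's while-loop of in-place list mutations (del tasks[0], del tasks[-1], += on the last element) with an index-based two-pointer sweep over a sorted copy carrying a running accumulator, and replaces the count/remove()-loop by a single filter pass; B does not mutate the caller's list.
-- intended difference: When every task fits (max <= workingHours), at least one task equals workingHours and exactly one task does not, A's 'len(tasks)==1' early return yields 1, dropping the full-day tasks it already counted, while B returns count(workingHours)+1, the intended number of task groups. — e.g. on tasksScheduling(5, [5, 2]): A returns 1, B returns 2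
import Mathlib
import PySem

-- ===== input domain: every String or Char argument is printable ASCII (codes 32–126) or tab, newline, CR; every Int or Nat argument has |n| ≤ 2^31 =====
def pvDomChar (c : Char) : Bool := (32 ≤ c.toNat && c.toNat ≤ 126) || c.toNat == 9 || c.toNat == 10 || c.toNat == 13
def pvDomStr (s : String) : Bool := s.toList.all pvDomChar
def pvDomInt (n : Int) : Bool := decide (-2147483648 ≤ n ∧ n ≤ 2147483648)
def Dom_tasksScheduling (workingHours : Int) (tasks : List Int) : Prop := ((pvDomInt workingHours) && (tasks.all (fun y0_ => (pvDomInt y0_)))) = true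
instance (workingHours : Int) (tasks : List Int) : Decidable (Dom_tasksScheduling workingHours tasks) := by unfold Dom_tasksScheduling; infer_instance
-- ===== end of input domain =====

-- B replaces A's loop of O(n) list mutations (del/remove/in-place +=) by a sorted two-pointer
-- sweep with a running accumulator; A mutates its `tasks` argument (remove() calls), B does not —
-- the equivalence proved here is about the return value only.

-- ===== PORT A =====
-- for ix in range(a): tasks.remove(workingHours)   (remove always succeeds here; getD is only a totality guard)
def pvRemoveLoop : Nat → Int → List Int → List Int
  | 0, _, xs => xs
  | n + 1, v, xs => pvRemoveLoop n v ((PySem.List.remove? xs v).getD xs)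

-- while len(tasks) > 1: …  ; afterwards this returns `count + len(tasks)` (the caller adds `a`)
def pvALoop (w : Int) (tasks : List Int) (count : Int) : Int :=
  if h : 1 < tasks.length then
    let first := PySem.List.pyGetD tasks 0 0           -- tasks[0]
    let lastv := PySem.List.pyGetD tasks (-1) 0        -- tasks[-1]
    if lastv + first < w then
      pvALoop w (tasks.tail.dropLast ++ [lastv + first]) count     -- tasks[-1]+=tasks[0]; del tasks[0]
    else if lastv + first = w then
      pvALoop w tasks.tail.dropLast (count + 1)                    -- del tasks[0]; del tasks[-1]
    else
      pvALoop w tasks.dropLast (count + 1)                         -- del tasks[-1]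
  else count + tasks.length
  termination_by tasks.length
  decreasing_by
  · simp only [List.length_append, List.length_dropLast, List.length_tail, List.length_cons,
      List.length_nil]
    omega
  · simp only [List.length_dropLast, List.length_tail]; omega
  · simp only [List.length_dropLast]; omega

def tasksScheduling (workingHours : Int) (tasks : List Int) : Int :=
  match PySem.List.max? tasks (fun x => x) with
  | none => 0      -- Python raises ValueError on max([]); excluded by Pre_
  | some m =>
    if m > workingHours then -1
    else
      let a : Int := (PySem.List.count tasks workingHours : Int)
      let tasks1 := pvRemoveLoop a.toNat workingHours tasks
      if tasks1 = [] then a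
      else if tasks1.length = 1 then 1
      else pvALoop workingHours (PySem.List.sorted tasks1 (fun x => x)) 0 + a

-- ===== PORT B =====
-- while lo < hi: two-pointer sweep; `acc` is the amount merged into rest[hi]
def pvBLoop (w : Int) (rest : List Int) (lo hi acc count : Int) : Int :=
  if lo < hi then
    let s := PySem.List.pyGetD rest lo 0 + PySem.List.pyGetD rest hi 0 + acc
    if s < w then pvBLoop w rest (lo + 1) hi (acc + PySem.List.pyGetD rest lo 0) count
    else if s = w then pvBLoop w rest (lo + 1) (hi - 1) 0 (count + 1)
    else pvBLoop w rest lo (hi - 1) 0 (count + 1)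
  else count + (if lo = hi then 1 else 0)
  termination_by (hi - lo).toNat
  decreasing_by
  · omega
  · omega
  · omega

def tasksScheduling_alt (workingHours : Int) (tasks : List Int) : Int :=
  match PySem.List.max? tasks (fun x => x) with
  | none => 0      -- max([]) raises in Python; excluded by Pre_
  | some m =>
    if m > workingHours then -1
    else
      let rest := PySem.List.sorted (tasks.filter (fun t => t ≠ workingHours)) (fun x => x)
      let count : Int := (tasks.length : Int) - (rest.length : Int)
      pvBLoop workingHours rest 0 ((rest.length : Int) - 1) 0 count

-- ===== PRECONDITION & SPEC =====
-- Pre_ excludes only the empty list, on which A's max(tasks) raises ValueError.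
def Pre_tasksScheduling (workingHours : Int) (tasks : List Int) : Prop := tasks ≠ []
instance (workingHours : Int) (tasks : List Int) : Decidable (Pre_tasksScheduling workingHours tasks) := by
  unfold Pre_tasksScheduling; infer_instance

def pvWitness_tasksScheduling : Int × List Int := (10, [3, 7, 4])

-- When every task fits (max ≤ workingHours), at least one task equals workingHours and exactly one
-- does not, A's 'len(tasks)==1' early return yields 1, dropping the full-day tasks it already
-- counted, while B returns count(workingHours)+1, the intended number of task groups.
def D_tasksScheduling (workingHours : Int) (tasks : List Int) : Prop :=
  (∀ t ∈ tasks, t ≤ workingHours) ∧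
    (tasks.filter (fun t => t ≠ workingHours)).length = 1 ∧ workingHours ∈ tasks
instance (workingHours : Int) (tasks : List Int) : Decidable (D_tasksScheduling workingHours tasks) := by
  unfold D_tasksScheduling; infer_instance

def Spec_tasksScheduling (workingHours : Int) (tasks : List Int) (out : Int) : Prop :=
  ¬ D_tasksScheduling workingHours tasks → out = tasksScheduling_alt workingHours tasks
instance (workingHours : Int) (tasks : List Int) (out : Int) : Decidable (Spec_tasksScheduling workingHours tasks out) := by
  unfold Spec_tasksScheduling; infer_instance

def pvDiffWitness_tasksScheduling : Int × List Int := (5, [5, 2])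
def pvDiffWitnessOut_tasksScheduling : Int × Int := (1, 2)

-- ===== CLAIM (what is proved, stated in full; the proofs are below) =====
def Claim_unchanged_tasksScheduling : Prop := ∀ (workingHours : Int) (tasks : List Int), Dom_tasksScheduling workingHours tasks → Pre_tasksScheduling workingHours tasks → Spec_tasksScheduling workingHours tasks (tasksScheduling workingHours tasks)
def Claim_changed_tasksScheduling : Prop := Dom_tasksScheduling (pvDiffWitness_tasksScheduling.1) (pvDiffWitness_tasksScheduling.2) ∧ Pre_tasksScheduling (pvDiffWitness_tasksScheduling.1) (pvDiffWitness_tasksScheduling.2) ∧ D_tasksScheduling (pvDiffWitness_tasksScheduling.1) (pvDiffWitness_tasksScheduling.2) ∧ tasksScheduling (pvDiffWitness_tasksScheduling.1) (pvDiffWitness_tasksScheduling.2) = pvDiffWitnessOut_tasksScheduling.1 ∧ tasksScheduling_alt (pvDiffWitness_tasksScheduling.1) (pvDiffWitness_tasksScheduling.2) = pvDiffWitnessOut_tasksScheduling.2 ∧ pvDiffWitnessOut_tasksScheduling.1 ≠ pvDiffWitnessOut_tasksScheduling.2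
def Claim_exact_tasksScheduling : Prop := ∀ (workingHours : Int) (tasks : List Int), Dom_tasksScheduling workingHours tasks → Pre_tasksScheduling workingHours tasks → D_tasksScheduling workingHours tasks → tasksScheduling workingHours tasks ≠ tasksScheduling_alt workingHours tasks

-- ===== LEMMAS AND PROOFS =====

lemma pvRemoveLoop_cons_ne {x v : Int} (h : x ≠ v) :
    ∀ (n : Nat) (xs : List Int), pvRemoveLoop n v (x :: xs) = x :: pvRemoveLoop n v xs := by
  intro n
  induction n with
  | zero => intro xs; rfl
  | succ n ih =>
    intro xs
    simp only [pvRemoveLoop, PySem.List.remove?_cons_of_ne xs h]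
    cases hr : PySem.List.remove? xs v with
    | none => simp [ih]
    | some ys => simp [ih]

-- removing count(v) copies of v removes exactly all of them
lemma pvRemoveLoop_count (v : Int) (xs : List Int) :
    pvRemoveLoop (xs.count v) v xs = xs.filter (fun t => t ≠ v) := by
  induction xs with
  | nil => rfl
  | cons x xs ih =>
    by_cases hx : x = v
    · subst hx
      simp only [List.count_cons_self, pvRemoveLoop, PySem.List.remove?_cons_self, Option.getD_some]
      simpa using ih
    · rw [List.count_cons_of_ne hx, pvRemoveLoop_cons_ne hx, ih]
      simp [hx]

lemma pv_filter_count_len (v : Int) (xs : List Int) :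
    (xs.filter (fun t => t ≠ v)).length + xs.count v = xs.length := by
  induction xs with
  | nil => rfl
  | cons x xs ih =>
    by_cases hx : x = v <;> simp_all [List.count_cons] <;> omega

-- pvALoop is affine in its accumulator
lemma pvALoop_shift (w : Int) : ∀ (n : Nat) (xs : List Int), xs.length ≤ n → ∀ (c d : Int),
    pvALoop w xs (c + d) = pvALoop w xs c + d := by
  intro n
  induction n with
  | zero =>
    intro xs hlen c d
    conv_lhs => rw [pvALoop]
    conv_rhs => rw [pvALoop]
    have h : ¬ 1 < xs.length := by omega
    simp only [dif_neg h]
    ring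
  | succ n ih =>
    intro xs hlen c d
    conv_lhs => rw [pvALoop]
    conv_rhs => rw [pvALoop]
    by_cases h : 1 < xs.length
    · simp only [dif_pos h]
      split_ifs with h1 h2
      · exact ih _ (by
          simp only [List.length_append, List.length_dropLast, List.length_tail,
            List.length_cons, List.length_nil]
          omega) c d
      · rw [show c + d + 1 = (c + 1) + d by ring]
        exact ih _ (by simp only [List.length_dropLast, List.length_tail]; omega) (c + 1) d
      · rw [show c + d + 1 = (c + 1) + d by ring]
        exact ih _ (by simp only [List.length_dropLast]; omega) (c + 1) d
    · simp only [dif_neg h]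
      ring

-- the segment rest[l..h] grows by one element on the right
lemma pvSeg_snoc (rest : List Int) (l h : Nat) (hl : l ≤ h) (hh : h < rest.length) :
    (rest.drop l).take (h + 1 - l) = (rest.drop l).take (h - l) ++ [rest[h]] := by
  rw [show h + 1 - l = (h - l) + 1 by omega, List.take_add_one]
  congr 1
  rw [List.getElem?_drop, show l + (h - l) = h by omega, List.getElem?_eq_getElem hh]
  rfl

-- SIMULATION: A's working list is always  rest[lo..hi-1] ++ [rest[hi] + acc]
lemma pvSim (w : Int) (rest : List Int) :
    ∀ (k lo hi : Nat) (acc count : Int), hi - lo = k → lo ≤ hi → (hh : hi < rest.length) →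
      pvALoop w ((rest.drop lo).take (hi - lo) ++ [rest[hi] + acc]) count
        = pvBLoop w rest lo hi acc count := by
  intro k
  induction k using Nat.strong_induction_on with
  | _ k ih =>
    intro lo hi acc count hk hle hh
    rcases Nat.lt_or_ge lo hi with hlt | hge
    · -- loop step: lo < hi
      have hlo : lo < rest.length := by omega
      have hA : (rest.drop lo).take (hi - lo)
          = rest[lo] :: ((rest.drop (lo + 1)).take (hi - (lo + 1))) := by
        rw [List.drop_eq_getElem_cons hlo, show hi - lo = (hi - (lo + 1)) + 1 by omega,
          List.take_succ_cons]
      have hSlen : ((rest.drop (lo + 1)).take (hi - (lo + 1))).length = hi - (lo + 1) := by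
        simp only [List.length_take, List.length_drop]
        omega
      rw [hA]
      conv_lhs => rw [pvALoop]
      conv_rhs => rw [pvBLoop]
      have hlen : 1 < ((rest[lo] :: ((rest.drop (lo + 1)).take (hi - (lo + 1)))) ++ [rest[hi] + acc]).length := by
        simp only [List.length_append, List.length_cons]
        omega
      rw [dif_pos hlen]
      have h0 : PySem.List.pyGetD ((rest[lo] :: ((rest.drop (lo + 1)).take (hi - (lo + 1)))) ++ [rest[hi] + acc]) 0 0 = rest[lo] := by
        rw [List.cons_append, PySem.List.pyGetD_zero_cons]
      have h1 : PySem.List.pyGetD ((rest[lo] :: ((rest.drop (lo + 1)).take (hi - (lo + 1)))) ++ [rest[hi] + acc]) (-1) 0 = rest[hi] + acc :=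
        PySem.List.pyGetD_neg_one_append_singleton _ _ _
      have hglo : PySem.List.pyGetD rest (lo : Int) 0 = rest[lo] := by
        rw [PySem.List.pyGetD_natCast, List.getD_eq_getElem rest 0 hlo]
      have hghi : PySem.List.pyGetD rest (hi : Int) 0 = rest[hi] := by
        rw [PySem.List.pyGetD_natCast, List.getD_eq_getElem rest 0 hh]
      simp only [h0, h1, hglo, hghi]
      rw [if_pos (show (lo : Int) < (hi : Int) by exact_mod_cast hlt)]
      have htail : ((rest[lo] :: ((rest.drop (lo + 1)).take (hi - (lo + 1)))) ++ [rest[hi] + acc]).tail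
          = (rest.drop (lo + 1)).take (hi - (lo + 1)) ++ [rest[hi] + acc] := by
        rw [List.cons_append, List.tail_cons]
      have hdl : ((rest[lo] :: ((rest.drop (lo + 1)).take (hi - (lo + 1)))) ++ [rest[hi] + acc]).dropLast
          = rest[lo] :: ((rest.drop (lo + 1)).take (hi - (lo + 1))) := List.dropLast_concat
      by_cases hc1 : rest[lo] + rest[hi] + acc < w
      · rw [if_pos (show rest[hi] + acc + rest[lo] < w by omega), if_pos hc1]
        rw [htail, List.dropLast_concat]
        have := ih (hi - (lo + 1)) (by omega) (lo + 1) hi (acc + rest[lo]) count rfl (by omega) hh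
        rw [show rest[hi] + (acc + rest[lo]) = rest[hi] + acc + rest[lo] by ring] at this
        rw [this, show ((lo + 1 : Nat) : Int) = (lo : Int) + 1 by omega]
      · rw [if_neg (show ¬ rest[hi] + acc + rest[lo] < w by omega), if_neg hc1]
        by_cases hc2 : rest[lo] + rest[hi] + acc = w
        · rw [if_pos (show rest[hi] + acc + rest[lo] = w by omega), if_pos hc2]
          rw [htail, List.dropLast_concat]
          rcases Nat.lt_or_ge (lo + 1) hi with h2 | h2
          · -- still at least two elements left
            have hseg := pvSeg_snoc rest (lo + 1) (hi - 1) (by omega) (by omega)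
            rw [show hi - 1 + 1 - (lo + 1) = hi - (lo + 1) by omega] at hseg
            rw [hseg]
            have := ih (hi - 1 - (lo + 1)) (by omega) (lo + 1) (hi - 1) 0 (count + 1) rfl (by omega) (by omega)
            rw [add_zero] at this
            rw [this, show ((lo + 1 : Nat) : Int) = (lo : Int) + 1 by omega,
              show ((hi - 1 : Nat) : Int) = (hi : Int) - 1 by omega]
          · -- exactly two elements: the loop empties the list
            have h2' : hi = lo + 1 := by omega
            have hnil : (rest.drop (lo + 1)).take (hi - (lo + 1)) = [] := by
              rw [h2']
              simp
            rw [hnil]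
            conv_lhs => rw [pvALoop]
            rw [dif_neg (by simp : ¬ 1 < ([] : List Int).length)]
            conv_rhs => rw [pvBLoop]
            rw [if_neg (show ¬ ((lo : Int) + 1 < (hi : Int) - 1) by omega),
              if_neg (show ¬ ((lo : Int) + 1 = (hi : Int) - 1) by omega)]
            simp
        · rw [if_neg (show ¬ rest[hi] + acc + rest[lo] = w by omega), if_neg hc2]
          rw [hdl]
          have hseg := pvSeg_snoc rest lo (hi - 1) (by omega) (by omega)
          rw [show hi - 1 + 1 - lo = hi - lo by omega] at hseg
          rw [hA] at hseg
          rw [hseg]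
          have := ih (hi - 1 - lo) (by omega) lo (hi - 1) 0 (count + 1) rfl (by omega) (by omega)
          rw [add_zero] at this
          rw [this, show ((hi - 1 : Nat) : Int) = (hi : Int) - 1 by omega]
    · -- loop exit: lo = hi
      have heq : lo = hi := by omega
      subst heq
      simp only [Nat.sub_self, List.take_zero, List.nil_append]
      conv_lhs => rw [pvALoop]
      rw [dif_neg (by simp : ¬ 1 < ([rest[lo] + acc] : List Int).length)]
      conv_rhs => rw [pvBLoop]
      rw [if_neg (show ¬ ((lo : Int) < (lo : Int)) by omega), if_pos rfl]
      simp

-- evaluation of both ports when exactly one task differs from workingHours (A's early return)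
lemma pvA_singleton (w : Int) (tasks : List Int) (m : Int)
    (hm : PySem.List.max? tasks (fun x => x) = some m) (hmw : ¬ m > w)
    (h1 : (tasks.filter (fun t => t ≠ w)).length = 1) :
    tasksScheduling w tasks = 1 := by
  unfold tasksScheduling
  simp only [hm, if_neg hmw]
  have hrm : pvRemoveLoop ((PySem.List.count tasks w : Int)).toNat w tasks
      = tasks.filter (fun t => t ≠ w) := by
    rw [Int.toNat_natCast, PySem.List.count_eq, pvRemoveLoop_count]
  rw [hrm, if_neg (by intro h; rw [h] at h1; simp at h1), if_pos h1]

lemma pvAlt_singleton (w : Int) (tasks : List Int) (m : Int)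
    (hm : PySem.List.max? tasks (fun x => x) = some m) (hmw : ¬ m > w)
    (h1 : (tasks.filter (fun t => t ≠ w)).length = 1) :
    tasksScheduling_alt w tasks = (List.count w tasks : Int) + 1 := by
  unfold tasksScheduling_alt
  simp only [hm, if_neg hmw]
  have hlen : (PySem.List.sorted (tasks.filter (fun t => t ≠ w)) (fun x => x)).length = 1 := by
    rw [PySem.List.length_sorted, h1]
  have hcnt : (tasks.filter (fun t => t ≠ w)).length + List.count w tasks = tasks.length :=
    pv_filter_count_len w tasks
  conv_lhs => rw [pvBLoop]
  rw [hlen]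
  norm_num
  omega

-- ===== VERDICT (by name: the statement is the Claim_ definition above) =====
theorem tasksScheduling_spec : Claim_unchanged_tasksScheduling := by
  intro w tasks _ hpre
  unfold Spec_tasksScheduling
  intro hnD
  cases hm : PySem.List.max? tasks (fun x => x) with
  | none =>
    exact absurd ((PySem.List.max?_eq_none_iff tasks _).mp hm) hpre
  | some m =>
    by_cases hmw : m > w
    · unfold tasksScheduling tasksScheduling_alt
      simp only [hm, if_pos hmw]
    · by_cases h1 : (tasks.filter (fun t => t ≠ w)).length = 1
      · -- A's early return; outside D_ the workingHours count is zero and both return 1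
        have hWnot : w ∉ tasks := by
          intro hmem
          exact hnD ⟨fun t ht => le_trans (PySem.List.max?_isMax hm t ht) (by omega), h1, hmem⟩
        rw [pvA_singleton w tasks m hm hmw h1, pvAlt_singleton w tasks m hm hmw h1,
          List.count_eq_zero.mpr hWnot]
        norm_num
      · -- main case
        unfold tasksScheduling tasksScheduling_alt
        simp only [hm, if_neg hmw]
        have hrm : pvRemoveLoop ((PySem.List.count tasks w : Int)).toNat w tasks
            = tasks.filter (fun t => t ≠ w) := by
          rw [Int.toNat_natCast, PySem.List.count_eq, pvRemoveLoop_count]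
        rw [hrm]
        have hcnt : (tasks.filter (fun t => t ≠ w)).length + List.count w tasks = tasks.length :=
          pv_filter_count_len w tasks
        have hslen : (PySem.List.sorted (tasks.filter (fun t => t ≠ w)) (fun x => x)).length
            = (tasks.filter (fun t => t ≠ w)).length := PySem.List.length_sorted _ _ _
        by_cases hF : tasks.filter (fun t => t ≠ w) = []
        · rw [if_pos hF, hF]
          have : PySem.List.sorted ([] : List Int) (fun x => x) = [] := rfl
          rw [this]
          conv_rhs => rw [pvBLoop]
          rw [if_neg (by norm_num), if_neg (by norm_num)]
          rw [hF] at hcnt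
          simp only [List.length_nil] at hcnt
          rw [PySem.List.count_eq]
          simp only [List.length_nil, Nat.cast_zero]
          omega
        · rw [if_neg hF, if_neg h1]
          set s := PySem.List.sorted (tasks.filter (fun t => t ≠ w)) (fun x => x) with hs
          have hs2 : 2 ≤ s.length := by
            rw [hslen]
            have hF0 : (tasks.filter (fun t => t ≠ w)).length ≠ 0 := by
              simpa [List.length_eq_zero_iff] using hF
            omega
          -- identify A's starting list with the simulation invariant
          have hsplit := pvSeg_snoc s 0 (s.length - 1) (Nat.zero_le _) (by omega)
          rw [show s.length - 1 + 1 - 0 = s.length by omega] at hsplit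
          simp only [List.drop_zero, List.take_length, Nat.sub_zero] at hsplit
          have hsim := pvSim w s (s.length - 1) 0 (s.length - 1) 0
            ((List.count w tasks : Nat) : Int) rfl (by omega) (by omega)
          simp only [List.drop_zero, Nat.sub_zero, add_zero] at hsim
          rw [← hsplit] at hsim
          have hshift := pvALoop_shift w s.length s le_rfl 0 ((List.count w tasks : Nat) : Int)
          rw [zero_add] at hshift
          rw [PySem.List.count_eq, ← hshift, hsim,
            show ((s.length - 1 : Nat) : Int) = (s.length : Int) - 1 by omega,
            show ((tasks.length : Nat) : Int) - (s.length : Int)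
              = ((List.count w tasks : Nat) : Int) by omega]
          norm_num
theorem tasksScheduling_changed : Claim_changed_tasksScheduling := by
  unfold Claim_changed_tasksScheduling
  refine ⟨by decide, by decide, by decide, by decide, ?_, by decide⟩
  show tasksScheduling_alt 5 [5, 2] = 2
  rw [show tasksScheduling_alt 5 [5, 2] = pvBLoop 5 [2] 0 0 0 1 from rfl, pvBLoop]
  norm_num
theorem tasksScheduling_tight : Claim_exact_tasksScheduling := by
  intro w tasks _ hpre hD
  obtain ⟨hle, h1, hmem⟩ := hD
  cases hm : PySem.List.max? tasks (fun x => x) with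
  | none =>
    exact absurd ((PySem.List.max?_eq_none_iff tasks _).mp hm) hpre
  | some m =>
    have hmw : ¬ m > w := not_lt.mpr (hle m (PySem.List.max?_mem hm))
    rw [pvA_singleton w tasks m hm hmw h1, pvAlt_singleton w tasks m hm hmw h1]
    have : 0 < List.count w tasks := List.count_pos_iff.mpr hmem
    omega
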